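-- pv_equiv track=rewrite | github.com/ali-m-dinani/reaxkit | src/reaxkit/workflows/vels_workflow.py | _parse_atoms_1based
-- ===== SOURCE A (Python) =====
-- from typing import Optional, Sequence, Tuple, Union
--
-- def _parse_atoms_1based(spec: Optional[str]) -> Optional[list[int]]:
--     """
--     Parse atoms like:
--       "1,3,7" or "1 3 7" or "1-5" (inclusive) or "1-10,15,20-25"
--     Returns 1-based indices (as stored in vels dfs).
--     """
--     if spec is None:
--         return None
--     s = spec.strip()
--     if not s:
--         return None
--
--     out: list[int] = []
--     parts = s.replace(",", " ").split()
--     for p in parts: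
--         if "-" in p:
--             a, b = p.split("-", 1)
--             if a.strip().isdigit() and b.strip().isdigit():
--                 lo, hi = int(a), int(b)
--                 if lo <= hi:
--                     out.extend(list(range(lo, hi + 1)))
--                 else:
--                     out.extend(list(range(hi, lo + 1)))
--         else:
--             if p.isdigit():
--                 out.append(int(p))
--
--     # unique, preserve order
--     seen = set()
--     uniq = []
--     for x in out:
--         if x not in seen:
--             uniq.append(x)
--             seen.add(x)
--     return uniq or None
-- ===== SOURCE B (Python) =====
-- from typing import Optional
--
-- def _parse_atoms_1based(spec: Optional[str]) -> Optional[list[int]]: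
--     if spec is None:
--         return None
--
--     def expand(tok):
--         if "-" in tok:
--             a, b = tok.split("-", 1)
--             if a.strip().isdigit() and b.strip().isdigit():
--                 lo, hi = int(a), int(b)
--                 return range(min(lo, hi), max(lo, hi) + 1)
--             return ()
--         return (int(tok),) if tok.isdigit() else ()
--
--     stream = [v for tok in spec.strip().replace(",", " ").split() for v in expand(tok)]
--     # first occurrence index of each value, via one backward sweep
--     first = {}
--     for i, v in reversed(list(enumerate(stream))):
--         first[v] = i
--     # unique values ordered by first appearance = sort distinct values by that index
--     return sorted(first, key=first.get) or None
-- ===== Notes on version B (the rewrite author's own statement) =====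
-- stated objective: alternative
-- what changed: B replaces A's loop-with-extend plus separate seen-set dedup pass by a different algorithm: it flattens all tokens into one stream by a comprehension (ranges normalized with min/max), computes each value's first-occurrence index with a single backward sweep that overwrites a dict, and produces the result by sorting the distinct values by that index (sort-by-first-occurrence instead of streaming seen-set dedup).
import Mathlib
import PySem

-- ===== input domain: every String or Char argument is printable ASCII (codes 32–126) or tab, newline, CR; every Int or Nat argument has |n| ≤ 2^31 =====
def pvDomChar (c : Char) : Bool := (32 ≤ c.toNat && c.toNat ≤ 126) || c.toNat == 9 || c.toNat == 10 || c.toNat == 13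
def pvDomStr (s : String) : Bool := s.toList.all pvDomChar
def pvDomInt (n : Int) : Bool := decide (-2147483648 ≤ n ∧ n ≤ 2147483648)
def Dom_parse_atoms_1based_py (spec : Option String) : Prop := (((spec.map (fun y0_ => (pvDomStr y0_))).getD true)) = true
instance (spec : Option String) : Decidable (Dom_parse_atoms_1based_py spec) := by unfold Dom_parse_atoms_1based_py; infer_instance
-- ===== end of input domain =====

-- B replaces A's extend-loop + seen-set dedup pass by sort-by-first-occurrence: flatten all
-- tokens into one stream, record each value's first index by a backward dict sweep, and sort
-- the distinct values by that index; objective: alternative, same result, similar cost.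

-- ===== PORT A =====
-- A's range-token branch: p.split("-", 1); both sides strip+isdigit-checked; ascending or
-- descending handled by the explicit lo<=hi test.  int(...) is guarded by isdigit, so the
-- Option returned by PySem.Int.ofStr? is always some; .getD 0 is never the default.
def pvRangeA (p : String) : List Int :=
  match PySem.Str.splitMax? p "-" 1 with
  | some (a :: b :: _) =>
      if PySem.Str.strIsdigit (PySem.Str.strip a) && PySem.Str.strIsdigit (PySem.Str.strip b) then
        let lo := (PySem.Int.ofStr? a).getD 0
        let hi := (PySem.Int.ofStr? b).getD 0
        if lo ≤ hi then PySem.List.pyRange lo (hi + 1) 1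
        else PySem.List.pyRange hi (lo + 1) 1
      else []
  | _ => []   -- unreachable: "-" in p guarantees two parts

def parse_atoms_1based_py (spec : Option String) : Option (List Int) :=
  match spec with
  | none => none
  | some spec =>
    let s := PySem.Str.strip spec
    if PySem.Str.len s = 0 then none
    else
      let parts := PySem.Str.split₀ (PySem.Str.replace s "," " ")
      let out : List Int := parts.foldl (fun out p =>
        if PySem.Str.isIn "-" p then out ++ pvRangeA p
        else if PySem.Str.strIsdigit p then out ++ [(PySem.Int.ofStr? p).getD 0]
        else out) []
      -- unique, preserve order
      let uniq := (out.foldl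
        (fun (su : PySem.Set Int × List Int) x =>
          if su.1.contains x then su else (su.1.add x, su.2 ++ [x]))
        (PySem.Set.empty, [])).2
      if uniq = [] then none else some uniq

-- ===== PORT B =====
-- B's expand helper: range tokens normalised to ascending with min/max, single integers as a
-- one-element list, anything else the empty list (Python returns () / an empty range there).
def pvExpandB (tok : String) : List Int :=
  if PySem.Str.isIn "-" tok then
    match PySem.Str.splitMax? tok "-" 1 with
    | some (a :: b :: _) =>
        if PySem.Str.strIsdigit (PySem.Str.strip a) && PySem.Str.strIsdigit (PySem.Str.strip b) then
          let lo := (PySem.Int.ofStr? a).getD 0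
          let hi := (PySem.Int.ofStr? b).getD 0
          PySem.List.pyRange (min lo hi) (max lo hi + 1) 1
        else []
    | _ => []   -- unreachable: "-" in tok guarantees two parts
  else if PySem.Str.strIsdigit tok then [(PySem.Int.ofStr? tok).getD 0]
  else []

def parse_atoms_1based_py_alt (spec : Option String) : Option (List Int) :=
  match spec with
  | none => none
  | some spec =>
    -- [v for tok in spec.strip().replace(",", " ").split() for v in expand(tok)]
    let stream := (PySem.Str.split₀ (PySem.Str.replace (PySem.Str.strip spec) "," " ")).flatMap pvExpandB
    -- for i, v in reversed(list(enumerate(stream))): first[v] = i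
    let first := (PySem.List.enumerate stream).reverse.foldl
      (fun (d : PySem.Dict Int Int) (p : Int × Int) => d.insert p.2 p.1) PySem.Dict.empty
    -- sorted(first, key=first.get): every key is present, so first.get(v) is its value; ported as getD v 0
    let res := PySem.List.sorted first.keys (fun k => first.getD k 0) false
    if res = [] then none else some res

-- ===== PRECONDITION & SPEC =====
def Spec_parse_atoms_1based_py (spec : Option String) (out : Option (List Int)) : Prop := out = parse_atoms_1based_py_alt spec
instance (spec : Option String) (out : Option (List Int)) : Decidable (Spec_parse_atoms_1based_py spec out) := by unfold Spec_parse_atoms_1based_py; infer_instance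

-- ===== CLAIM (what is proved, stated in full; the proofs are below) =====
def Claim_equal_parse_atoms_1based_py : Prop := ∀ (spec : Option String), Dom_parse_atoms_1based_py spec → Spec_parse_atoms_1based_py spec (parse_atoms_1based_py spec)

-- ===== LEMMAS AND PROOFS =====

-- A's per-token contribution, factored out of its branch-in-the-loop form
def pvProcA (p : String) : List Int :=
  if PySem.Str.isIn "-" p then pvRangeA p
  else if PySem.Str.strIsdigit p then [(PySem.Int.ofStr? p).getD 0]
  else []

theorem pvFoldA_eq_flatMap (parts : List String) (out : List Int) :
    parts.foldl (fun out p =>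
        if PySem.Str.isIn "-" p then out ++ pvRangeA p
        else if PySem.Str.strIsdigit p then out ++ [(PySem.Int.ofStr? p).getD 0]
        else out) out
      = out ++ parts.flatMap pvProcA := by
  induction parts generalizing out with
  | nil => simp
  | cons p ps ih =>
      simp only [List.foldl_cons, List.flatMap_cons, ih, pvProcA]
      split_ifs <;> simp

theorem pvRange_minmax (lo hi : Int) :
    (if lo ≤ hi then PySem.List.pyRange lo (hi + 1) 1 else PySem.List.pyRange hi (lo + 1) 1)
      = PySem.List.pyRange (min lo hi) (max lo hi + 1) 1 := by
  split_ifs with h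
  · rw [min_eq_left h, max_eq_right h]
  · rw [min_eq_right (by omega), max_eq_left (by omega)]

theorem pvProcA_eq_expandB (p : String) : pvProcA p = pvExpandB p := by
  unfold pvProcA pvExpandB pvRangeA
  by_cases h1 : PySem.Str.isIn "-" p = true
  · rw [if_pos h1, if_pos h1]
    cases hm : PySem.Str.splitMax? p "-" 1 with
    | none => rfl
    | some l =>
        match l with
        | [] => rfl
        | [_] => rfl
        | a :: b :: t =>
            dsimp only
            by_cases h : (PySem.Str.strIsdigit (PySem.Str.strip a)
                && PySem.Str.strIsdigit (PySem.Str.strip b)) = true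
            · rw [if_pos h, if_pos h]; exact pvRange_minmax _ _
            · rw [if_neg h, if_neg h]
  · rw [if_neg h1, if_neg h1]

-- A's seen-set loop keeps its two components equal, so its result is Set.update
theorem pvDedupFold (l : List Int) : ∀ s : List Int,
    l.foldl (fun (su : PySem.Set Int × List Int) x =>
        if su.1.contains x then su else (su.1.add x, su.2 ++ [x])) (s, s)
      = (PySem.Set.update s l, PySem.Set.update s l) := by
  induction l with
  | nil => intro s; simp [PySem.Set.update]
  | cons x t ih =>
      intro s
      have hstep : (if (PySem.Set.contains s x) = true then ((s : PySem.Set Int), s) else (PySem.Set.add s x, s ++ [x]))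
          = (PySem.Set.add s x, PySem.Set.add s x) := by
        by_cases hx : x ∈ s <;> simp [PySem.Set.add, PySem.Set.contains, hx]
      simp only [List.foldl_cons]
      rw [hstep, ih]
      simp [PySem.Set.update]

-- the backward index sweep stores each value's FIRST index in the stream
theorem pvFirstGet (xs : List Int) : ∀ (s v : Int),
    ((PySem.List.enumerate xs s).reverse.foldl
        (fun (d : PySem.Dict Int Int) (p : Int × Int) => d.insert p.2 p.1) PySem.Dict.empty).get? v
      = if v ∈ xs then some (s + (xs.idxOf v : Int)) else none := by
  induction xs with
  | nil => intro s v; simp [PySem.List.enumerate_nil, PySem.Dict.get?_empty]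
  | cons x t ih =>
      intro s v
      rw [PySem.List.enumerate_cons, List.reverse_cons, List.foldl_append]
      simp only [List.foldl_cons, List.foldl_nil]
      rw [PySem.Dict.get?_insert]
      by_cases hv : v = x
      · subst hv
        simp [List.idxOf_cons_self]
      · rw [if_neg hv, ih (s+1) v]
        by_cases hm : v ∈ t
        · rw [if_pos hm, if_pos (by simp [hm])]
          have : (x :: t).idxOf v = t.idxOf v + 1 := by
            simp [Ne.symm hv]
          rw [this]
          push_cast
          ring_nf
        · rw [if_neg hm, if_neg (by simp [hv, hm])]

-- invariant for the fold behind Set.ofList: first-occurrence order is idxOf-increasing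
theorem pvUpd (full : List Int) : ∀ (rest pre : List Int), pre ++ rest = full →
    (PySem.Set.ofList pre).Pairwise (fun a b => full.idxOf a < full.idxOf b) →
    (PySem.Set.update (PySem.Set.ofList pre) rest).Pairwise
      (fun a b => full.idxOf a < full.idxOf b) := by
  intro rest
  induction rest with
  | nil => intro pre _ hp; simpa [PySem.Set.update] using hp
  | cons x rs ih =>
      intro pre hfull hp
      have hadd : PySem.Set.add (PySem.Set.ofList pre) x = PySem.Set.ofList (pre ++ [x]) := by
        simp [PySem.Set.ofList_eq_foldl, List.foldl_append]
      have hstep : PySem.Set.update (PySem.Set.ofList pre) (x :: rs)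
          = PySem.Set.update (PySem.Set.ofList (pre ++ [x])) rs := by
        simp [PySem.Set.update, hadd]
      rw [hstep]
      apply ih (pre ++ [x]) (by simpa using hfull)
      rw [← hadd]
      by_cases hx : x ∈ PySem.Set.ofList pre
      · simpa [PySem.Set.add, PySem.Set.contains, hx] using hp
      · have hxpre : x ∉ pre := by
          intro h; exact hx (by simpa [PySem.Set.mem_ofList] using h)
        have hxadd : PySem.Set.add (PySem.Set.ofList pre) x = PySem.Set.ofList pre ++ [x] := by
          simp [PySem.Set.add, PySem.Set.contains, hx]
        rw [hxadd, List.pairwise_append]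
        refine ⟨hp, by simp, ?_⟩
        intro a ha b hb
        have hb' : b = x := by simpa using hb
        have hapre : a ∈ pre := by simpa [PySem.Set.mem_ofList] using ha
        have h1 : full.idxOf a < pre.length := by
          rw [← hfull, List.idxOf_append_of_mem hapre]
          exact List.idxOf_lt_length_of_mem hapre
        have h2 : pre.length ≤ full.idxOf b := by
          rw [hb', ← hfull, List.idxOf_append_of_notMem hxpre]
          omega
        omega

-- set(xs) in first-occurrence order is strictly increasing under first-occurrence index
theorem pvOfList_pairwise_idxOf (stream : List Int) :
    (PySem.Set.ofList stream).Pairwise (fun a b => stream.idxOf a < stream.idxOf b) := by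
  have h := pvUpd stream stream [] rfl (by simp [PySem.Set.ofList_eq_foldl])
  simpa [PySem.Set.update, PySem.Set.ofList_eq_foldl] using h

-- B's sorted-by-first-index result IS the first-occurrence dedup of the stream
theorem pvSorted_eq_ofList (stream : List Int) :
    PySem.List.sorted
        ((PySem.List.enumerate stream).reverse.foldl
          (fun (d : PySem.Dict Int Int) (p : Int × Int) => d.insert p.2 p.1) PySem.Dict.empty).keys
        (fun k => ((PySem.List.enumerate stream).reverse.foldl
          (fun (d : PySem.Dict Int Int) (p : Int × Int) => d.insert p.2 p.1) PySem.Dict.empty).getD k 0)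
        false
      = PySem.Set.ofList stream := by
  set first := (PySem.List.enumerate stream).reverse.foldl
      (fun (d : PySem.Dict Int Int) (p : Int × Int) => d.insert p.2 p.1) PySem.Dict.empty with hfirst
  have hget : ∀ v, first.get? v = if v ∈ stream then some ((stream.idxOf v : Int)) else none := by
    intro v
    have h0 := pvFirstGet stream 0 v
    simp only [zero_add] at h0
    exact h0
  have hkeys : ∀ v, v ∈ first.keys ↔ v ∈ stream := by
    intro v
    rw [← not_iff_not, ← PySem.Dict.get?_eq_none_iff_not_mem_keys, hget v]
    by_cases h : v ∈ stream <;> simp [h]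
  have hnodupk : first.keys.Nodup := by
    exact PySem.Dict.nodup_keys_foldl_insert_key (PySem.List.enumerate stream).reverse
      (fun (p : Int × Int) => p.2) (fun _ p => p.1) PySem.Dict.empty PySem.Dict.nodup_keys_empty
  have hperm : (PySem.Set.ofList stream).Perm first.keys := by
    rw [List.perm_ext_iff_of_nodup (PySem.Set.nodup_ofList _) hnodupk]
    intro a
    rw [hkeys a, PySem.Set.mem_ofList]
  have hpw : (PySem.Set.ofList stream).Pairwise
      (fun a b => (fun k => first.getD k 0) a < (fun k => first.getD k 0) b) := by
    have base := pvOfList_pairwise_idxOf stream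
    refine List.Pairwise.imp_of_mem ?_ base
    intro a b ha hb hlt
    have ha' : a ∈ stream := (PySem.Set.mem_ofList _ _).mp ha
    have hb' : b ∈ stream := (PySem.Set.mem_ofList _ _).mp hb
    simp only [PySem.Dict.getD_eq_get?_getD, hget, if_pos ha', if_pos hb', Option.getD_some]
    exact_mod_cast hlt
  exact PySem.List.sorted_eq_of_perm_of_pairwise_lt first.keys (PySem.Set.ofList stream)
    (fun k => first.getD k 0) hperm hpw

-- ===== VERDICT (by name: the statement is the Claim_ definition above) =====
theorem parse_atoms_1based_py_spec : Claim_equal_parse_atoms_1based_py := by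
  intro spec _
  unfold Spec_parse_atoms_1based_py
  cases spec with
  | none => rfl
  | some s =>
      show parse_atoms_1based_py (some s) = parse_atoms_1based_py_alt (some s)
      simp only [parse_atoms_1based_py, parse_atoms_1based_py_alt]
      by_cases h : PySem.Str.len (PySem.Str.strip s) = 0
      · rw [if_pos h]
        have hs : PySem.Str.strip s = "" := by
          simp [PySem.Str.len_eq] at h
          exact String.toList_eq_nil_iff.mp (by rw [PySem.Str.toList_strip]; exact h)
        rw [hs]
        rfl
      · rw [if_neg h, pvFoldA_eq_flatMap, List.nil_append]
        rw [show ((PySem.Set.empty : PySem.Set Int), ([] : List Int))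
              = (([] : List Int), ([] : List Int)) from rfl]
        rw [pvDedupFold, pvSorted_eq_ofList]
        have hproc : pvProcA = pvExpandB := funext pvProcA_eq_expandB
        have hupd : ∀ (l : List Int), PySem.Set.update ([] : PySem.Set Int) l = PySem.Set.ofList l := by
          intro l
          rw [PySem.Set.ofList_eq_foldl]
          rfl
        rw [hproc, hupd]
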